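-- pv_equiv track=rewrite | github.com/arjunbaburaj001/python-learning | challenges/largestOddeven.py | largest_odd_even_count
-- ===== SOURCE A (Python) =====
-- def largest_odd_even_count(numbers):
--     even_count = None
--     odd_count = None
--
--     for n in numbers:
--         if n % 2 == 0:
--             if even_count is None or n > even_count:
--                 even_count = n
--         else:
--             if odd_count is None or n > odd_count:
--                 odd_count = n
--
--     return even_count, odd_count
-- ===== SOURCE B (Python) =====
-- def largest_odd_even_count(numbers):
--     evens = [n for n in numbers if n % 2 == 0]
--     odds = [n for n in numbers if n % 2 != 0]
--     return (max(evens) if evens else None, max(odds) if odds else None)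
-- ===== Notes on version B (the rewrite author's own statement) =====
-- stated objective: idiomatic
-- what changed: Replaced the single interleaved running-max loop with two filter comprehensions followed by guarded max() reductions.
import Mathlib
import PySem

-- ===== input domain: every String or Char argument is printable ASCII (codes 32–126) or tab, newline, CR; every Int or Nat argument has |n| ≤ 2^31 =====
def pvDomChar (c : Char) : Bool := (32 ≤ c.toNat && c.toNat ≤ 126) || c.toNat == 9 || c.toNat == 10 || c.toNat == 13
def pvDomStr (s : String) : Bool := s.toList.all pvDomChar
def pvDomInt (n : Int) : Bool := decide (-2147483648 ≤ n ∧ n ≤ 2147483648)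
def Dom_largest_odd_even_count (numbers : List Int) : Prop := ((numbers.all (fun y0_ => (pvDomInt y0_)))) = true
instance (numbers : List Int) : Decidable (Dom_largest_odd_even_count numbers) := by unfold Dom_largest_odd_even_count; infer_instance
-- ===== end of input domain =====

-- B replaces A's single interleaved running-max loop by two filter passes with guarded max reductions (idiomatic; same cost).

-- ===== PORT A =====
-- literal port of A: one fold over the list carrying the pair (even_count, odd_count)
def largest_odd_even_count (numbers : List Int) : Option Int × Option Int :=
  numbers.foldl
    (fun (st : Option Int × Option Int) n =>
      if PySem.Int.mod n 2 == 0 then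
        (match st.1 with
          | none => some n
          | some e => if n > e then some n else some e, st.2)
      else
        (st.1, match st.2 with
          | none => some n
          | some o => if n > o then some n else some o))
    (none, none)

-- ===== PORT B =====
-- literal port of B: two comprehensions, then max() guarded by an emptiness test
def largest_odd_even_count_alt (numbers : List Int) : Option Int × Option Int :=
  let evens := numbers.filter (fun n => PySem.Int.mod n 2 == 0)
  let odds := numbers.filter (fun n => PySem.Int.mod n 2 != 0)
  ((if evens ≠ [] then PySem.List.max? evens (fun y => y) else none),
   (if odds ≠ [] then PySem.List.max? odds (fun y => y) else none))

-- ===== PRECONDITION & SPEC =====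
def Spec_largest_odd_even_count (numbers : List Int) (out : Option Int × Option Int) : Prop := out = largest_odd_even_count_alt numbers
instance (numbers : List Int) (out : Option Int × Option Int) : Decidable (Spec_largest_odd_even_count numbers out) := by unfold Spec_largest_odd_even_count; infer_instance

-- ===== CLAIM (what is proved, stated in full; the proofs are below) =====
def Claim_equal_largest_odd_even_count : Prop := ∀ (numbers : List Int), Dom_largest_odd_even_count numbers → Spec_largest_odd_even_count numbers (largest_odd_even_count numbers)

-- ===== LEMMAS AND PROOFS =====

-- A's update step for one of the two running maxima
def pvStep (acc : Option Int) (n : Int) : Option Int :=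
  match acc with
  | none => some n
  | some m => if n > m then some n else some m

lemma pvStep_some (x y : Int) : pvStep (some x) y = some (max x y) := by
  simp only [pvStep]
  split_ifs with h
  · rw [max_eq_right (le_of_lt h)]
  · rw [max_eq_left (not_lt.mp h)]

-- A's interleaved fold splits into two independent folds over the filtered lists
lemma pv_fold_split (l : List Int) (a b : Option Int) :
    l.foldl
      (fun (st : Option Int × Option Int) n =>
        if PySem.Int.mod n 2 == 0 then
          (match st.1 with
            | none => some n
            | some e => if n > e then some n else some e, st.2)
        else
          (st.1, match st.2 with
            | none => some n
            | some o => if n > o then some n else some o))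
      (a, b)
    = ((l.filter (fun n => PySem.Int.mod n 2 == 0)).foldl pvStep a,
       (l.filter (fun n => PySem.Int.mod n 2 != 0)).foldl pvStep b) := by
  induction l generalizing a b with
  | nil => simp
  | cons x t ih =>
    have h2 : (PySem.Int.mod x 2 != 0) = !(PySem.Int.mod x 2 == 0) := by
      simp [bne]
    by_cases h : (PySem.Int.mod x 2 == 0) = true
    · simp only [List.foldl_cons, List.filter_cons, h, h2, Bool.not_true, if_true]
      rw [ih]; rfl
    · simp only [List.foldl_cons, List.filter_cons, h2, Bool.not_false, if_true,
        (Bool.eq_false_iff.mpr (fun hc => h hc) : (PySem.Int.mod x 2 == 0) = false)]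
      rw [ih]; rfl

lemma pv_fold_some (t : List Int) (x : Int) :
    t.foldl pvStep (some x) = some (t.foldl max x) := by
  induction t generalizing x with
  | nil => rfl
  | cons y s ih => simp [List.foldl_cons, pvStep_some, ih]

lemma pv_fold_none (l : List Int) :
    l.foldl pvStep none = if l ≠ [] then PySem.List.max? l (fun y => y) else none := by
  cases l with
  | nil => rfl
  | cons x t =>
    simp [pvStep, pv_fold_some, PySem.List.max?_id_cons]

-- ===== VERDICT (by name: the statement is the Claim_ definition above) =====
theorem largest_odd_even_count_spec : Claim_equal_largest_odd_even_count := by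
  intro numbers _
  unfold Spec_largest_odd_even_count largest_odd_even_count largest_odd_even_count_alt
  rw [pv_fold_split]
  simp [pv_fold_none]
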